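-- pv_equiv track=rewrite | github.com/qusers/Q | src/QligFEP/CLI/pdb_to_amber.py | nest_pdb
-- ===== SOURCE A (Python) =====
-- from typing import List
--
-- def nest_pdb(pdbarr: List[str]) -> List[List[str]]:
--     """Organizes a flat list of PDB (Protein Data Bank) file lines into a nested structure
--     grouped by residues. This function takes a list of strings, each representing a line
--     from a PDB file, and groups these lines by residue. Each residue's lines are collected
--     based on continuity of residue identifiers and uniqueness of atom names within the
--     residue. This nested structure is useful for operations that require manipulation or
--     analysis on a per-residue basis.
--
--     args:
--         pdbarr: A list where each element is a string representing a line from a PDB file.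
--
--     Returns:
--     - nestedpdb : Each inner list contains all the lines from the input
--         corresponding to a single residue. The grouping is based on residue identifiers
--         (including residue name, chain identifier, and residue sequence number) and ensures
--         that each atom within a residue is unique.
--
--     Notes:
--     - The function assumes that the input list is ordered as it would be in a standard PDB file,
--         where lines corresponding to atoms of the same residue are consecutive.
--     """
--     nestedpdb = []
--     residue = []
--     usedatoms = []
--     for line in pdbarr:
--         atom = line[12:17].strip()
--         if not residue or line[17:27] != residue[-1][17:27] or atom in usedatoms:
--             if residue: nestedpdb.append(residue)
--             residue = [line]
--             usedatoms = [atom]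
--         else:
--             residue.append(line)
--             usedatoms.append(atom)
--     if residue:
--         nestedpdb.append(residue)
--     return nestedpdb
-- ===== SOURCE B (Python) =====
-- def nest_pdb(pdbarr):
--     # Alternative decomposition: peel one whole residue off the front at a time
--     # (rest is kept as a reversed stack so removing the next line is O(1)),
--     # comparing each candidate line's residue id against the residue's FIRST
--     # line and tracking the atom names already used in a set.
--     nestedpdb = []
--     rest = pdbarr[::-1]          # rest[-1] is the next unconsumed line
--     while rest:
--         first = rest.pop()
--         residue = [first]
--         seen = {first[12:17].strip()}
--         while rest:
--             line = rest[-1]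
--             atom = line[12:17].strip()
--             if line[17:27] != first[17:27] or atom in seen:
--                 break
--             seen.add(atom)
--             residue.append(line)
--             rest.pop()
--         nestedpdb.append(residue)
--     return nestedpdb
-- ===== Notes on version B (the rewrite author's own statement) =====
-- stated objective: alternative
-- what changed: Replaced A's single flat fold over a (nested, residue, usedatoms) triple with its compare-to-previous-line cut test by an outer loop that peels one maximal residue off the front per iteration (inner loop compares ids against the residue's first line and atom names against a set).
import Mathlib
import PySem

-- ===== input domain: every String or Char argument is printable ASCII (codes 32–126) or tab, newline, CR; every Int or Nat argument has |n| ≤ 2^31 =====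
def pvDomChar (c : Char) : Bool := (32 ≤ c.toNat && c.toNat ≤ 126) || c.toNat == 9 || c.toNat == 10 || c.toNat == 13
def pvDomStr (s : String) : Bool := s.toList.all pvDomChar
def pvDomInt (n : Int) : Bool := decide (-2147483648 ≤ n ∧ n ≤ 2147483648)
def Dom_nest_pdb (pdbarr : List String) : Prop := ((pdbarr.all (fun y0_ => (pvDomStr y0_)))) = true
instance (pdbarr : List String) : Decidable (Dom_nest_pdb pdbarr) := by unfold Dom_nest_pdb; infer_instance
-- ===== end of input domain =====

-- B groups the lines by a different decomposition (peel one maximal residue off the front per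
-- iteration, comparing ids against the residue's FIRST line and atom names against a set) instead
-- of A's single flat fold with a compare-to-previous-line cut test; same return value, proved equal.

-- ===== PORT A =====
-- line[17:27]
def pvKey (l : String) : String := PySem.Str.slice l (some 17) (some 27)
-- line[12:17].strip()
def pvAtom (l : String) : String := PySem.Str.strip (PySem.Str.slice l (some 12) (some 17))

-- one iteration of A's for-loop; state = (nestedpdb, residue, usedatoms)
def nest_pdb_step (st : List (List String) × List String × List String) (line : String) :
    List (List String) × List String × List String :=
  let atom := pvAtom line
  let nested := st.1
  let residue := st.2.1
  let used := st.2.2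
  if residue = [] ∨ pvKey line ≠ pvKey ((PySem.List.pyGet? residue (-1)).getD "") ∨ atom ∈ used then
    ((if residue = [] then nested else nested ++ [residue]), [line], [atom])
  else
    (nested, residue ++ [line], used ++ [atom])

def nest_pdb (pdbarr : List String) : List (List String) :=
  let st := pdbarr.foldl nest_pdb_step ([], [], [])
  if st.2.1 = [] then st.1 else st.1 ++ [st.2.1]

-- ===== PORT B =====
-- B's inner while-loop: extend the residue started by a line of id `k`, atoms seen so far `seen`;
-- returns (lines added to the residue, remaining lines)
def pvGrab (k : String) (seen : PySem.Set String) : List String → List String × List String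
  | [] => ([], [])
  | l :: rest =>
    if pvKey l = k ∧ ¬ PySem.Set.contains seen (pvAtom l) then
      let p := pvGrab k (PySem.Set.add seen (pvAtom l)) rest
      (l :: p.1, p.2)
    else ([], l :: rest)

-- termination measure for B's outer loop
theorem pvGrab_len (k : String) (seen : PySem.Set String) (xs : List String) :
    (pvGrab k seen xs).2.length ≤ xs.length := by
  induction xs generalizing seen with
  | nil => simp [pvGrab]
  | cons l rest ih =>
    simp only [pvGrab]
    split
    · exact le_trans (ih _) (Nat.le_succ _)
    · simp

-- B's outer while-loop
def nest_pdb_alt (pdbarr : List String) : List (List String) :=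
  match pdbarr with
  | [] => []
  | l :: rest =>
    let p := pvGrab (pvKey l) (PySem.Set.add PySem.Set.empty (pvAtom l)) rest
    (l :: p.1) :: nest_pdb_alt p.2
termination_by pdbarr.length
decreasing_by
  simp only [List.length_cons]
  exact Nat.lt_succ_of_le (pvGrab_len _ _ _)

-- ===== PRECONDITION & SPEC =====
def Spec_nest_pdb (pdbarr : List String) (out : List (List String)) : Prop := out = nest_pdb_alt pdbarr
instance (pdbarr : List String) (out : List (List String)) : Decidable (Spec_nest_pdb pdbarr out) := by unfold Spec_nest_pdb; infer_instance

-- ===== CLAIM (what is proved, stated in full; the proofs are below) =====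
def Claim_equal_nest_pdb : Prop := ∀ (pdbarr : List String), Dom_nest_pdb pdbarr → Spec_nest_pdb pdbarr (nest_pdb pdbarr)

-- ===== LEMMAS AND PROOFS =====

-- residue[-1] of a nonempty list is its last element
theorem pvGet_neg_one (xs : List String) (h : xs ≠ []) :
    (PySem.List.pyGet? xs (-1)).getD "" = xs.getLast h := by
  have hl : 0 < xs.length := List.length_pos_iff.mpr h
  have h1 : PySem.List.pyIdx? xs.length (-1) = some (xs.length - 1) := by
    simp [PySem.List.pyIdx?]
    omega
  simp [PySem.List.pyGet?, h1, List.getElem?_eq_getElem (by omega : xs.length - 1 < xs.length),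
    List.getLast_eq_getElem]

-- main invariant: running the tail of A's fold from a nonempty residue (all ids = k,
-- usedatoms agreeing with `seen` as a membership test) computes B's continuation
theorem pv_main (rest : List String) (acc : List (List String)) (res used : List String)
    (k : String) (seen : PySem.Set String)
    (hne : res ≠ []) (hk : ∀ l ∈ res, pvKey l = k)
    (hu : ∀ a, a ∈ used ↔ PySem.Set.contains seen a = true) :
    (let st := rest.foldl nest_pdb_step (acc, res, used);
     if st.2.1 = [] then st.1 else st.1 ++ [st.2.1])
    = acc ++ ((res ++ (pvGrab k seen rest).1) :: nest_pdb_alt (pvGrab k seen rest).2) := by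
  induction rest generalizing acc res used k seen with
  | nil =>
    simp only [List.foldl_nil, pvGrab]
    rw [nest_pdb_alt.eq_def]
    simp [hne]
  | cons l rest ih =>
    have hlast : pvKey ((PySem.List.pyGet? res (-1)).getD "") = k := by
      rw [pvGet_neg_one res hne]; exact hk _ (List.getLast_mem hne)
    simp only [List.foldl_cons]
    by_cases hc : pvKey l = k ∧ ¬ PySem.Set.contains seen (pvAtom l) = true
    · -- line continues the current residue in both programs
      have hcond : ¬ (res = [] ∨ pvKey l ≠ pvKey ((PySem.List.pyGet? res (-1)).getD "") ∨ pvAtom l ∈ used) := by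
        push Not
        exact ⟨hne, by rw [hlast]; exact hc.1, fun hmem => hc.2 ((hu _).mp hmem)⟩
      have hstep : nest_pdb_step (acc, res, used) l = (acc, res ++ [l], used ++ [pvAtom l]) := by
        simp only [nest_pdb_step, if_neg hcond]
      have hkeys : ∀ m ∈ res ++ [l], pvKey m = k := by
        intro m hm
        rcases List.mem_append.mp hm with hm | hm
        · exact hk m hm
        · simp only [List.mem_singleton] at hm; subst hm; exact hc.1
      have hmem : ∀ a, a ∈ used ++ [pvAtom l] ↔
          PySem.Set.contains (PySem.Set.add seen (pvAtom l)) a = true := by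
        intro a
        have hm : ∀ b, b ∈ used ↔ b ∈ seen := fun b => (hu b).trans List.contains_iff_mem
        simp [PySem.Set.contains, PySem.Set.mem_add, hm]
      rw [hstep, ih acc (res ++ [l]) (used ++ [pvAtom l]) k (PySem.Set.add seen (pvAtom l))
        (by simp) hkeys hmem]
      simp only [pvGrab, if_pos hc]
      simp [List.append_assoc]
    · -- A cuts here; B's inner loop stops and the outer loop starts a new residue
      have hcond : (res = [] ∨ pvKey l ≠ pvKey ((PySem.List.pyGet? res (-1)).getD "") ∨ pvAtom l ∈ used) := by
        rcases not_and_or.mp hc with h1 | h2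
        · right; left; rw [hlast]; exact h1
        · right; right; exact (hu _).mpr (not_not.mp h2)
      have hstep : nest_pdb_step (acc, res, used) l = (acc ++ [res], [l], [pvAtom l]) := by
        simp only [nest_pdb_step, if_pos hcond, if_neg hne]
      have hmem1 : ∀ a, a ∈ [pvAtom l] ↔
          PySem.Set.contains (PySem.Set.add PySem.Set.empty (pvAtom l)) a = true := by
        intro a
        simp [PySem.Set.contains, List.contains_iff_mem, PySem.Set.empty]
      rw [hstep, ih (acc ++ [res]) [l] [pvAtom l] (pvKey l)
        (PySem.Set.add PySem.Set.empty (pvAtom l)) (by simp) (by simp) hmem1]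
      simp only [pvGrab, if_neg hc]
      conv_rhs => rw [nest_pdb_alt.eq_def]
      simp [PySem.Set.add, PySem.Set.empty, PySem.Set.contains]

-- ===== VERDICT (by name: the statement is the Claim_ definition above) =====
theorem nest_pdb_spec : Claim_equal_nest_pdb := by
  intro pdbarr _
  unfold Spec_nest_pdb
  cases pdbarr with
  | nil =>
    rw [nest_pdb_alt.eq_def]
    simp [nest_pdb]
  | cons l rest =>
    have h0 : nest_pdb (l :: rest)
        = (let st := rest.foldl nest_pdb_step ([], [l], [pvAtom l]);
           if st.2.1 = [] then st.1 else st.1 ++ [st.2.1]) := by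
      simp [nest_pdb, nest_pdb_step]
    rw [h0, pv_main rest [] [l] [pvAtom l] (pvKey l) (PySem.Set.add PySem.Set.empty (pvAtom l))
        (by simp) (by simp)
        (by intro a; simp [PySem.Set.add, PySem.Set.contains, PySem.Set.empty])]
    conv_rhs => rw [nest_pdb_alt.eq_def]
    simp [PySem.Set.add, PySem.Set.empty, PySem.Set.contains]
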